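-- pv_equiv track=rewrite | github.com/TheOriginalSoni/pyramid | pyramid.py | filter_doubleletters_2same
-- ===== SOURCE A (Python) =====
-- import itertools
-- from collections import Counter
--
-- def filter_doubleletters_2same(words,yn):
-- 	fs = set()
-- 	for word in words:
-- 		a = [''.join(g) for _, g in itertools.groupby(word)]
-- 		b = dict(Counter(''.join(list(map(lambda x: x if (len(x)>=2) else "",a)))))
-- 		c = sum(map(lambda x: 1 if b.get(x)>=4 else 0,b))
-- 		if yn:
-- 			if(c>=1):
-- 				fs.add(word)
-- 		else:
-- 			if(not c>=1):
-- 				fs.add(word)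
-- 	return fs
-- ===== SOURCE B (Python) =====
-- def filter_doubleletters_2same(words, yn):
--     fs = set()
--     for word in words:
--         prevs = [None] + list(word[:-1])
--         nexts = list(word[1:]) + [None]
--         cond = any(
--             sum(1 for x, p, nx in zip(word, prevs, nexts)
--                 if x == c and (p == c or nx == c)) >= 4
--             for c in set(word))
--         if cond == yn:
--             fs.add(word)
--     return fs
-- ===== Notes on version B (the rewrite author's own statement) =====
-- stated objective: alternative
-- what changed: Instead of grouping the word into runs and summing blanked runs through a Counter, B tests each distinct character directly: it zips the word with its shifted neighbours and counts the positions equal to that character and to a left or right neighbour (a position is in a doubled run iff it has an equal neighbour); no runs, joins or counter dict are built.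
import Mathlib
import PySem

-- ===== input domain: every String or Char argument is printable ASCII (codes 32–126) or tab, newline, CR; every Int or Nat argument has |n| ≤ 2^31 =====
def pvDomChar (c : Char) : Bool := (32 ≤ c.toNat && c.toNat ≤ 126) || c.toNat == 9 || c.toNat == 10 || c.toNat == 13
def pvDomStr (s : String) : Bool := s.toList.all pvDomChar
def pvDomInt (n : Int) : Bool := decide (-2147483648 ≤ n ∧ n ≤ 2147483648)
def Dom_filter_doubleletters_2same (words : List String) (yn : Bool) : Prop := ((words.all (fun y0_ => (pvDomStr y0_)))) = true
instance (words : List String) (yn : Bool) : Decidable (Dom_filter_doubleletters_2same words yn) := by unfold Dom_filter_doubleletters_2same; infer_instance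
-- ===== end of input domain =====

-- B replaces A's run grouping (groupby / blank-short-runs / join / Counter / indicator sum) by a
-- per-character positional test: for each distinct character, count the positions that equal it and
-- equal a left or right neighbour (objective: alternative — no runs, no counter dict are built).

-- ===== PORT A =====
-- itertools.groupby(word): the list of maximal runs of equal characters, in order
def pvRuns : List Char → List (List Char)
  | [] => []
  | c :: rest =>
    match pvRuns rest with
    | [] => [[c]]
    | r :: rs =>
      match r with
      | [] => [c] :: r :: rs      -- unreachable: runs are never empty
      | x :: _ => if x = c then (c :: r) :: rs else [c] :: r :: rs

def filter_doubleletters_2same (words : List String) (yn : Bool) : List String :=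
  words.foldl (fun fs word =>
    let a : List (List Char) := pvRuns word.toList
    let b : PySem.Dict Char Int :=
      PySem.Dict.counter (PySem.Chars.join [] (a.map (fun x => if 2 ≤ x.length then x else [])))
    -- b.get(x) for x ranging over b's keys always finds x: getD x 0 is exact here
    let c : Int := (b.keys.map (fun x => if 4 ≤ b.getD x 0 then (1 : Int) else 0)).sum
    if yn then (if 1 ≤ c then PySem.Set.add fs word else fs)
    else (if ¬ 1 ≤ c then PySem.Set.add fs word else fs)) PySem.Set.empty

-- ===== PORT B =====
-- sum(1 for x, p, nx in zip(word, prevs, nexts) if x == c and (p == c or nx == c))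
def pvAdjCount (w : List Char) (c : Char) : Int :=
  let prevs : List (Option Char) := none :: (PySem.List.slice w none (some (-1))).map some
  let nexts : List (Option Char) := (PySem.List.slice w (some 1) none).map some ++ [none]
  ((w.zip (prevs.zip nexts)).countP
    (fun t => t.1 == c && (t.2.1 == some c || t.2.2 == some c)) : Nat)

def filter_doubleletters_2same_alt (words : List String) (yn : Bool) : List String :=
  words.foldl (fun fs word =>
    let cond : Bool :=
      (PySem.Set.ofList word.toList).any (fun c => decide (4 ≤ pvAdjCount word.toList c))
    if cond == yn then PySem.Set.add fs word else fs) PySem.Set.empty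

-- ===== PRECONDITION & SPEC =====
def Spec_filter_doubleletters_2same (words : List String) (yn : Bool) (out : List String) : Prop := out = filter_doubleletters_2same_alt words yn
instance (words : List String) (yn : Bool) (out : List String) : Decidable (Spec_filter_doubleletters_2same words yn out) := by unfold Spec_filter_doubleletters_2same; infer_instance

-- ===== CLAIM (what is proved, stated in full; the proofs are below) =====
def Claim_equal_filter_doubleletters_2same : Prop := ∀ (words : List String) (yn : Bool), Dom_filter_doubleletters_2same words yn → Spec_filter_doubleletters_2same words yn (filter_doubleletters_2same words yn)

-- ===== LEMMAS AND PROOFS =====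

-- A's per-word count c (proof-side abbreviation)
def pvCA (w : List Char) : Int :=
  let b := PySem.Dict.counter (PySem.Chars.join []
    ((pvRuns w).map (fun x => if 2 ≤ x.length then x else [])))
  (b.keys.map (fun x => if 4 ≤ b.getD x 0 then (1 : Int) else 0)).sum

-- the doubled-run character total: occurrences of k in the runs of length ≥ 2
def pvJ (rs : List (List Char)) (k : Char) : Nat :=
  ((rs.map (fun r => if 2 ≤ r.length then r else [])).flatten).count k

-- B's triple list, recursively: the previous character is threaded down
def pvTrip (p : Option Char) : List Char → List (Char × Option Char × Option Char)
  | [] => []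
  | x :: xs => (x, p, xs.head?) :: pvTrip (some x) xs

def pvPred (c : Char) (t : Char × Option Char × Option Char) : Bool :=
  t.1 == c && (t.2.1 == some c || t.2.2 == some c)

def pvCnt (p : Option Char) (w : List Char) (c : Char) : Nat :=
  (pvTrip p w).countP (pvPred c)

lemma pvJ_nil (k : Char) : pvJ [] k = 0 := rfl

lemma pvJ_cons (r : List (List Char)) (q : List Char) (k : Char) :
    pvJ (q :: r) k = (if 2 ≤ q.length then q.count k else 0) + pvJ r k := by
  simp only [pvJ, List.map_cons, List.flatten_cons, List.count_append]
  split_ifs <;> simp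

lemma pvRuns_head (c : Char) (rest : List Char) :
    ∃ s rs, pvRuns (c :: rest) = (c :: s) :: rs := by
  simp only [pvRuns]
  rcases h : pvRuns rest with _ | ⟨r, rs⟩
  · exact ⟨[], [], rfl⟩
  · rcases r with _ | ⟨x, t⟩
    · exact ⟨[], ([] : List Char) :: rs, rfl⟩
    · by_cases hx : x = c
      · subst hx
        exact ⟨x :: t, rs, by simp⟩
      · exact ⟨[], (x :: t) :: rs, by simp [hx]⟩

lemma pvRuns_replicate (c : Char) : ∀ n : Nat, 1 ≤ n →
    pvRuns (List.replicate n c) = [List.replicate n c] := by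
  intro n
  induction n with
  | zero => intro h; omega
  | succ m ih =>
    intro _
    by_cases hm : 1 ≤ m
    · have hih := ih hm
      rcases m with _ | m'
      · omega
      · simp only [List.replicate_succ, pvRuns] at hih ⊢
        rw [hih]
        simp
    · have : m = 0 := by omega
      subst this; rfl

lemma pvRuns_replicate_append (c x : Char) (xs : List Char) (hx : x ≠ c) :
    ∀ n : Nat, 1 ≤ n →
    pvRuns (List.replicate n c ++ (x :: xs)) = List.replicate n c :: pvRuns (x :: xs) := by
  intro n
  induction n with
  | zero => intro h; omega
  | succ m ih =>
    intro _
    by_cases hm : 1 ≤ m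
    · have hih := ih hm
      rcases m with _ | m'
      · omega
      · simp only [List.replicate_succ, List.cons_append, pvRuns] at hih ⊢
        rw [hih]
        simp
    · have hm0 : m = 0 := by omega
      subst hm0
      obtain ⟨s, rs, hr⟩ := pvRuns_head x xs
      have hunf : pvRuns (c :: (x :: xs)) =
          (match pvRuns (x :: xs) with
           | [] => [[c]]
           | r :: rs =>
             match r with
             | [] => [c] :: r :: rs
             | y :: _ => if y = c then (c :: r) :: rs else [c] :: r :: rs) := rfl
      simp only [List.replicate_succ, List.replicate_zero, List.nil_append, List.cons_append]
      rw [hunf, hr]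
      simp [hx]

-- the zip of (word, prevs, nexts) IS pvTrip
lemma pvZip_eq_trip : ∀ (w : List Char) (p : Option Char),
    w.zip ((p :: w.dropLast.map some).zip ((w.drop 1).map some ++ [none])) = pvTrip p w := by
  intro w
  induction w with
  | nil => intro p; rfl
  | cons x xs ih =>
    intro p
    rcases xs with _ | ⟨y, ys⟩
    · rfl
    · simp only [pvTrip, List.head?_cons]
      have h1 : (x :: y :: ys).dropLast = x :: (y :: ys).dropLast := List.dropLast_cons₂
      rw [h1]
      simp only [List.drop_one, List.map_cons, List.zip_cons_cons, List.tail_cons,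
        List.cons_append]
      exact congrArg _ (ih (some x))

lemma pvAdjCount_eq_cnt (w : List Char) (c : Char) :
    pvAdjCount w c = (pvCnt none w c : Int) := by
  have h := pvZip_eq_trip w none
  simp only [pvAdjCount, PySem.List.slice_to_neg_one, PySem.List.slice_from_one,
    ← List.drop_one, h, pvCnt, pvPred]
  rfl

lemma pvCnt_nil (p : Option Char) (c : Char) : pvCnt p [] c = 0 := rfl

lemma pvCnt_cons (p : Option Char) (x : Char) (xs : List Char) (c : Char) :
    pvCnt p (x :: xs) c =
      (if x = c ∧ (p = some c ∨ xs.head? = some c) then 1 else 0) + pvCnt (some x) xs c := by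
  simp only [pvCnt, pvTrip, List.countP_cons, pvPred]
  by_cases hB : (x == c && (p == some c || xs.head? == some c)) = true
  · have hP : x = c ∧ (p = some c ∨ xs.head? = some c) := by simpa using hB
    rw [if_pos hB, if_pos hP]
    omega
  · have hP : ¬ (x = c ∧ (p = some c ∨ xs.head? = some c)) := by
      intro hcontra
      obtain ⟨hx, hor⟩ := hcontra
      exact hB (by rcases hor with h' | h' <;> simp [hx, h'])
    rw [if_neg hB, if_neg hP]
    omega

-- a run preceded by the same character: every position has an equal neighbour
lemma pvCnt_rep_same (a c : Char) : ∀ (n : Nat), ∀ (ys : List Char),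
    pvCnt (some a) (List.replicate n a ++ ys) c =
      (if c = a then n else 0) + pvCnt (some a) ys c := by
  intro n
  induction n with
  | zero => intro ys; simp
  | succ m ih =>
    intro ys
    rw [List.replicate_succ, List.cons_append, pvCnt_cons, ih ys]
    by_cases hc : c = a
    · subst hc
      rw [if_pos ⟨rfl, Or.inl rfl⟩, if_pos rfl, if_pos rfl]
      omega
    · have hac : ¬ a = c := fun h => hc h.symm
      rw [if_neg (fun h => hac h.1), if_neg hc, if_neg hc]
      omega

-- a maximal run (prev ≠ a, next element ≠ a): it contributes n iff n ≥ 2 and c = a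
lemma pvCnt_rep (a c : Char) (p : Option Char) (hp : p ≠ some a) (ys : List Char)
    (hy : ∀ b, ys.head? = some b → b ≠ a) : ∀ (n : Nat), 1 ≤ n →
    pvCnt p (List.replicate n a ++ ys) c =
      (if 2 ≤ n ∧ c = a then n else 0) + pvCnt (some a) ys c := by
  intro n
  induction n with
  | zero => intro h; omega
  | succ m _ =>
    intro _
    rcases Nat.eq_or_lt_of_le (show 1 ≤ m + 1 by omega) with h1 | h2
    · -- n = 1
      have hm : m = 0 := by omega
      subst hm
      simp only [List.replicate_succ, List.replicate_zero, List.nil_append,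
        List.singleton_append]
      rw [pvCnt_cons]
      have hno : ¬ (a = c ∧ (p = some c ∨ ys.head? = some c)) := by
        rintro ⟨rfl, hor⟩
        rcases hor with h' | h'
        · exact hp h'
        · exact hy a h' rfl
      rw [if_neg hno, if_neg (by rintro ⟨h2, -⟩; omega : ¬ (2 ≤ 0 + 1 ∧ c = a))]
    · -- n = m + 1, m ≥ 1
      have hm : 1 ≤ m := by omega
      rw [List.replicate_succ, List.cons_append, pvCnt_cons, pvCnt_rep_same a c m ys]
      have hhead : (List.replicate m a ++ ys).head? = some a := by
        rcases m with _ | m'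
        · omega
        · simp [List.replicate_succ]
      by_cases hc : c = a
      · subst hc
        rw [if_pos ⟨rfl, Or.inr hhead⟩, if_pos rfl, if_pos ⟨by omega, rfl⟩]
        omega
      · have hac : ¬ a = c := fun h => hc h.symm
        rw [if_neg (fun h => hac h.1), if_neg hc, if_neg (fun h => hc h.2)]
        omega

-- main bridge: B's adjacency count over a word equals A's doubled-run total
lemma pvCnt_eq_pvJ (c : Char) : ∀ (xs : List Char) (a : Char) (n : Nat), 1 ≤ n →
    ∀ (p : Option Char), p ≠ some a →
    pvCnt p (List.replicate n a ++ xs) c = pvJ (pvRuns (List.replicate n a ++ xs)) c := by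
  intro xs
  induction xs with
  | nil =>
    intro a n hn p hp
    rw [pvCnt_rep a c p hp [] (by simp) n hn, List.append_nil,
      pvRuns_replicate a n hn, pvJ_cons, pvJ_nil, pvCnt_nil]
    simp only [List.length_replicate, List.count_replicate, Nat.add_zero]
    by_cases hca : c = a
    · subst hca
      by_cases h2 : 2 ≤ n
      · rw [if_pos ⟨h2, rfl⟩, if_pos h2]
        simp
      · rw [if_neg (fun h => h2 h.1), if_neg h2]
    · have hac : (a == c) = false := beq_eq_false_iff_ne.mpr (fun h => hca h.symm)
      by_cases h2 : 2 ≤ n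
      · rw [if_neg (fun h => hca h.2), if_pos h2]
        simp [hac]
      · rw [if_neg (fun h => h2 h.1), if_neg h2]
  | cons x rest ih =>
    intro a n hn p hp
    by_cases hx : x = a
    · subst hx
      have hrw : List.replicate n x ++ x :: rest = List.replicate (n + 1) x ++ rest := by
        rw [List.replicate_succ']; simp
      rw [hrw]
      exact ih x (n + 1) (by omega) p hp
    · have hy : ∀ b, (x :: rest).head? = some b → b ≠ a := by
        intro b hb
        simp only [List.head?_cons, Option.some.injEq] at hb
        rw [← hb]; exact hx
      rw [pvCnt_rep a c p hp (x :: rest) hy n hn]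
      have hone : x :: rest = List.replicate 1 x ++ rest := by simp
      have hih : pvCnt (some a) (x :: rest) c = pvJ (pvRuns (x :: rest)) c := by
        rw [hone]
        exact ih x 1 (by omega) (some a) (by simp [Ne.symm hx])
      rw [hih, pvRuns_replicate_append a x rest hx n hn, pvJ_cons]
      simp only [List.length_replicate, List.count_replicate]
      by_cases hca : c = a
      · subst hca
        by_cases h2 : 2 ≤ n
        · rw [if_pos ⟨h2, rfl⟩, if_pos h2]
          simp
        · rw [if_neg (fun h => h2 h.1), if_neg h2]
      · have hac : (a == c) = false := beq_eq_false_iff_ne.mpr (fun h => hca h.symm)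
        by_cases h2 : 2 ≤ n
        · rw [if_neg (fun h => hca h.2), if_pos h2]
          simp [hac]
        · rw [if_neg (fun h => h2 h.1), if_neg h2]

lemma pvCnt_none_eq_pvJ (w : List Char) (c : Char) :
    pvCnt none w c = pvJ (pvRuns w) c := by
  rcases w with _ | ⟨x, xs⟩
  · rfl
  · have : (x :: xs) = List.replicate 1 x ++ xs := by simp
    rw [this]
    exact pvCnt_eq_pvJ c xs x 1 (by omega) none (by simp)

-- every run's flatten is the word itself
lemma pvRuns_flatten : ∀ (w : List Char), (pvRuns w).flatten = w := by
  intro w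
  induction w with
  | nil => rfl
  | cons x xs ih =>
    simp only [pvRuns]
    rcases h : pvRuns xs with _ | ⟨r, rs⟩
    · rw [h] at ih; simp at ih; simp [ih]
    · rw [h] at ih
      rcases r with _ | ⟨y, t⟩
      · simp at ih ⊢; exact ih
      · by_cases hy : y = x
        · subst hy
          simp at ih ⊢; exact ih
        · simp [hy] at ih ⊢; exact ih

lemma pvJ_pos_mem (w : List Char) (k : Char) (h : 0 < pvJ (pvRuns w) k) : k ∈ w := by
  unfold pvJ at h
  have hk : k ∈ ((pvRuns w).map (fun r => if 2 ≤ r.length then r else [])).flatten :=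
    List.count_pos_iff.mp h
  rw [List.mem_flatten] at hk
  obtain ⟨q, hq, hkq⟩ := hk
  rw [List.mem_map] at hq
  obtain ⟨r, hr, hq'⟩ := hq
  have hkr : k ∈ r := by
    by_cases h2 : 2 ≤ r.length
    · rw [if_pos h2] at hq'
      rw [hq']; exact hkq
    · rw [if_neg h2] at hq'
      rw [← hq'] at hkq
      simp at hkq
  have : k ∈ (pvRuns w).flatten := List.mem_flatten.mpr ⟨r, hr, hkr⟩
  rwa [pvRuns_flatten] at this

-- the joined string A counts over is the flatten pvJ counts over
lemma pvJoin_nil (l : List (List Char)) : PySem.Chars.join [] l = l.flatten := by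
  simp only [PySem.Chars.join, List.intercalate]
  induction l with
  | nil => rfl
  | cons a l ih =>
    rcases l with _ | ⟨b, t⟩
    · rfl
    · simp only [List.intersperse, List.flatten_cons] at ih ⊢
      simpa using ih

lemma pvCondB_iff (w : List Char) :
    ((PySem.Set.ofList w).any (fun c => decide (4 ≤ pvAdjCount w c))) = true ↔
      ∃ k : Char, 4 ≤ ((pvJ (pvRuns w) k : Nat) : Int) := by
  simp only [List.any_eq_true, decide_eq_true_eq, PySem.Set.mem_ofList]
  constructor
  · rintro ⟨c, _, h4⟩
    refine ⟨c, ?_⟩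
    rwa [pvAdjCount_eq_cnt, pvCnt_none_eq_pvJ] at h4
  · rintro ⟨k, h4⟩
    have hpos : 0 < pvJ (pvRuns w) k := by omega
    refine ⟨k, pvJ_pos_mem w k hpos, ?_⟩
    rw [pvAdjCount_eq_cnt, pvCnt_none_eq_pvJ]
    exact h4

lemma pvCondA_iff (w : List Char) :
    (1 : Int) ≤ pvCA w ↔ ∃ k : Char, 4 ≤ ((pvJ (pvRuns w) k : Nat) : Int) := by
  unfold pvCA
  simp only []
  set b := PySem.Dict.counter (PySem.Chars.join []
    ((pvRuns w).map (fun x => if 2 ≤ x.length then x else []))) with hb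
  set joined := PySem.Chars.join [] ((pvRuns w).map (fun x => if 2 ≤ x.length then x else [])) with hj
  have hJ : ∀ k, pvJ (pvRuns w) k = joined.count k := by
    intro k
    rw [hj, pvJoin_nil]
    rfl
  have hsum : (b.keys.map (fun x => if 4 ≤ b.getD x 0 then (1 : Int) else 0)).sum
      = ((List.countP (fun x => decide (4 ≤ b.getD x 0)) b.keys : Nat) : Int) := by
    have := PySem.List.sum_map_ite_one_zero (fun x => decide (4 ≤ b.getD x 0)) b.keys
    simpa using this
  rw [hsum]
  constructor
  · intro h
    have hpos : 0 < List.countP (fun x => decide (4 ≤ b.getD x 0)) b.keys := by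
      exact_mod_cast h
    obtain ⟨x, hx, hp⟩ := List.countP_pos_iff.mp hpos
    refine ⟨x, ?_⟩
    have h4 : 4 ≤ b.getD x 0 := by simpa using hp
    rw [hb, PySem.Dict.getD_counter] at h4
    rw [hJ]
    exact h4
  · rintro ⟨k, h4⟩
    rw [hJ] at h4
    have hk4 : 4 ≤ b.getD k 0 := by rw [hb, PySem.Dict.getD_counter]; exact h4
    have hkmem : k ∈ b.keys := by
      rw [hb, PySem.Dict.keys_counter, PySem.Set.mem_ofList]
      have hpos : 0 < joined.count k := by
        have : (0 : Int) < (joined.count k : Int) := by omega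
        exact_mod_cast this
      exact List.count_pos_iff.mp hpos
    have hpos : 0 < List.countP (fun x => decide (4 ≤ b.getD x 0)) b.keys :=
      List.countP_pos_iff.mpr ⟨k, hkmem, by simpa using hk4⟩
    exact_mod_cast hpos

lemma pvStep_eq (fs : List String) (word : String) (yn : Bool) :
    (if yn then (if 1 ≤ pvCA word.toList then PySem.Set.add fs word else fs)
     else (if ¬ 1 ≤ pvCA word.toList then PySem.Set.add fs word else fs)) =
    (if ((PySem.Set.ofList word.toList).any
          (fun c => decide (4 ≤ pvAdjCount word.toList c))) == yn
     then PySem.Set.add fs word else fs) := by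
  by_cases hc : ∃ k : Char, 4 ≤ ((pvJ (pvRuns word.toList) k : Nat) : Int)
  · have hA := (pvCondA_iff word.toList).mpr hc
    have hB := (pvCondB_iff word.toList).mpr hc
    rw [hB]
    cases yn <;> simp [hA]
  · have hA : ¬ (1 : Int) ≤ pvCA word.toList := fun h => hc ((pvCondA_iff word.toList).mp h)
    have hB : ((PySem.Set.ofList word.toList).any
        (fun c => decide (4 ≤ pvAdjCount word.toList c))) = false := by
      rcases hb : ((PySem.Set.ofList word.toList).any
          (fun c => decide (4 ≤ pvAdjCount word.toList c))) with _ | _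
      · rfl
      · exact absurd ((pvCondB_iff word.toList).mp hb) hc
    rw [hB]
    cases yn <;> simp [hA]

-- ===== VERDICT (by name: the statement is the Claim_ definition above) =====
theorem filter_doubleletters_2same_spec : Claim_equal_filter_doubleletters_2same := by
  intro words yn _
  unfold Spec_filter_doubleletters_2same filter_doubleletters_2same filter_doubleletters_2same_alt
  exact PySem.List.foldl_congr_mem words _ _ _ (fun fs w _ => pvStep_eq fs w yn)
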